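-- pv_equiv track=rewrite | github.com/haozhoulyu416/ARCFW-Tool | tournament_selection.py | find_front_index
-- ===== SOURCE A (Python) =====
-- def find_front_index(non_dominated, p1, p2):
--     f1_0, f2_0 = -1, -1
--     f1_1, f2_1 = -1, -1
--     for i, fn in enumerate(non_dominated):
--         for j, value in enumerate(fn):
--             if p1 == value:
--                 f1_0 = i
--                 f1_1 = j
--             if p2 == value:
--                 f2_0 = i
--                 f2_1 = j
--     return f1_0, f1_1, f2_0, f2_1
-- ===== SOURCE B (Python) =====
-- def find_front_index(non_dominated, p1, p2):
--     f1_0, f2_0 = -1, -1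
--     f1_1, f2_1 = -1, -1
--     found1 = found2 = False
--     for i, fn in reversed(list(enumerate(non_dominated))):
--         for j, value in reversed(list(enumerate(fn))):
--             if not found1 and p1 == value:
--                 f1_0, f1_1 = i, j
--                 found1 = True
--             if not found2 and p2 == value:
--                 f2_0, f2_1 = i, j
--                 found2 = True
--             if found1 and found2:
--                 break
--         if found1 and found2:
--             break
--     return f1_0, f1_1, f2_0, f2_1
-- ===== Notes on version B (the rewrite author's own statement) =====
-- stated objective: alternative
-- what changed: B scans the fronts in reverse with found-flags and breaks out of both loops as soon as both values have been located (first match from the end = last match overall), instead of A's full forward sweep that keeps overwriting the indices.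
import Mathlib
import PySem

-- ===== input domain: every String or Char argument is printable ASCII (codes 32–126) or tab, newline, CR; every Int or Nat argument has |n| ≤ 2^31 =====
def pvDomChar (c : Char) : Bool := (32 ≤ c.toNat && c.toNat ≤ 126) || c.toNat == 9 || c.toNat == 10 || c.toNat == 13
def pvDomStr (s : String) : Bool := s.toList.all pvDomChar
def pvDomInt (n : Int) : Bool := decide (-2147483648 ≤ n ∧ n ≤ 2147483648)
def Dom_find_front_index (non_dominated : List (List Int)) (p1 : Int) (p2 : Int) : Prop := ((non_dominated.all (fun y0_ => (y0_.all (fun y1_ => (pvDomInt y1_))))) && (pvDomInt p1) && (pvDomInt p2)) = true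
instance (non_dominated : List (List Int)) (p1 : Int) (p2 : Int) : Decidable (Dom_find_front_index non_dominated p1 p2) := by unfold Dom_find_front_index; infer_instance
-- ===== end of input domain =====

-- B restructures the traversal: reverse scan with found-flags and an early break
-- once both values are located; same return value as A everywhere.

-- ===== PORT A =====
-- forward sweep over enumerate(non_dominated) / enumerate(fn), overwriting on every match
def find_front_index (non_dominated : List (List Int)) (p1 : Int) (p2 : Int) : Int × Int × Int × Int :=
  let st :=
    (PySem.List.enumerate non_dominated 0).foldl
      (fun (s : (Int × Int) × (Int × Int)) ifn =>
        (PySem.List.enumerate ifn.2 0).foldl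
          (fun (s : (Int × Int) × (Int × Int)) jv =>
            ((if p1 == jv.2 then (ifn.1, jv.1) else s.1),
             (if p2 == jv.2 then (ifn.1, jv.1) else s.2))) s)
      (((-1 : Int), (-1 : Int)), ((-1 : Int), (-1 : Int)))
  (st.1.1, st.1.2, st.2.1, st.2.2)

-- ===== PORT B =====
-- inner loop: for j, value in reversed(list(enumerate(fn))) with the two guarded
-- assignments and 'break' once both flags are set (modelled by stopping the recursion)
def ffiAltInner (p1 p2 i : Int) : List (Int × Int) →
    ((Int × Int) × Bool) × ((Int × Int) × Bool) → ((Int × Int) × Bool) × ((Int × Int) × Bool)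
  | [], st => st
  | jv :: rest, st =>
    let s1 := if !st.1.2 && p1 == jv.2 then ((i, jv.1), true) else st.1
    let s2 := if !st.2.2 && p2 == jv.2 then ((i, jv.1), true) else st.2
    if s1.2 && s2.2 then (s1, s2) else ffiAltInner p1 p2 i rest (s1, s2)

-- outer loop: for i, fn in reversed(list(enumerate(non_dominated))) with 'break' once both found
def ffiAltOuter (p1 p2 : Int) : List (Int × List Int) →
    ((Int × Int) × Bool) × ((Int × Int) × Bool) → ((Int × Int) × Bool) × ((Int × Int) × Bool)
  | [], st => st
  | ifn :: rest, st =>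
    let st' := ffiAltInner p1 p2 ifn.1 (PySem.List.enumerate ifn.2 0).reverse st
    if st'.1.2 && st'.2.2 then st' else ffiAltOuter p1 p2 rest st'

def find_front_index_alt (non_dominated : List (List Int)) (p1 : Int) (p2 : Int) : Int × Int × Int × Int :=
  let st := ffiAltOuter p1 p2 (PySem.List.enumerate non_dominated 0).reverse
      ((((-1 : Int), (-1 : Int)), false), (((-1 : Int), (-1 : Int)), false))
  (st.1.1.1, st.1.1.2, st.2.1.1, st.2.1.2)

-- ===== PRECONDITION & SPEC =====
def Spec_find_front_index (non_dominated : List (List Int)) (p1 : Int) (p2 : Int) (out : Int × Int × Int × Int) : Prop := out = find_front_index_alt non_dominated p1 p2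
instance (non_dominated : List (List Int)) (p1 : Int) (p2 : Int) (out : Int × Int × Int × Int) : Decidable (Spec_find_front_index non_dominated p1 p2 out) := by unfold Spec_find_front_index; infer_instance

-- ===== CLAIM (what is proved, stated in full; the proofs are below) =====
def Claim_equal_find_front_index : Prop := ∀ (non_dominated : List (List Int)) (p1 : Int) (p2 : Int), Dom_find_front_index non_dominated p1 p2 → Spec_find_front_index non_dominated p1 p2 (find_front_index non_dominated p1 p2)

-- ===== LEMMAS AND PROOFS =====

-- single-value step functions (proof helpers only)
def ffiStepA (p : Int) (s : Int × Int) (e : Int × Int × Int) : Int × Int :=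
  if p == e.2.2 then (e.1, e.2.1) else s

def ffiStepB (p : Int) (s : (Int × Int) × Bool) (e : Int × Int × Int) : (Int × Int) × Bool :=
  if !s.2 && p == e.2.2 then ((e.1, e.2.1), true) else s

-- the flattened triple list (i, j, v) in A's forward order
def ffiFlat (nd : List (List Int)) : List (Int × Int × Int) :=
  (PySem.List.enumerate nd 0).flatMap
    (fun ifn => (PySem.List.enumerate ifn.2 0).map (fun jv => (ifn.1, jv.1, jv.2)))

-- a fold with two independent accumulators is two folds
theorem ffiProdSplit {α β γ : Type} (f : β → α → β) (g : γ → α → γ)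
    (l : List α) (a : β) (b : γ) :
    l.foldl (fun s e => (f s.1 e, g s.2 e)) (a, b) = (l.foldl f a, l.foldl g b) := by
  induction l generalizing a b with
  | nil => rfl
  | cons x l ih => simp [ih]

theorem ffiStepB_flagged (p : Int) (l : List (Int × Int × Int)) (s : Int × Int) :
    l.foldl (ffiStepB p) (s, true) = (s, true) := by
  induction l with
  | nil => rfl
  | cons e l ih => simpa [ffiStepB] using ih

theorem ffiFold_flag_mono (p : Int) (l : List (Int × Int × Int)) (s : (Int × Int) × Bool)
    (h : s.2 = true) : l.foldl (ffiStepB p) s = s := by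
  have := ffiStepB_flagged p l s.1
  rwa [← h, Prod.mk.eta] at this

theorem ffiStepB_char (p : Int) (l : List (Int × Int × Int)) (s : Int × Int) :
    l.foldl (ffiStepB p) (s, false) =
      match l.find? (fun e => p == e.2.2) with
      | some e => ((e.1, e.2.1), true)
      | none => (s, false) := by
  induction l generalizing s with
  | nil => rfl
  | cons e l ih =>
    by_cases h : p == e.2.2
    · simp [ffiStepB, h, List.find?_cons_of_pos, ffiStepB_flagged]
    · simp only [List.foldl_cons, ffiStepB, h]
      simp [h, ih s]

theorem ffiStepA_char (p : Int) (l : List (Int × Int × Int)) (s : Int × Int) :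
    l.foldl (ffiStepA p) s =
      match l.reverse.find? (fun e => p == e.2.2) with
      | some e => (e.1, e.2.1)
      | none => s := by
  induction l generalizing s with
  | nil => rfl
  | cons e l ih =>
    simp only [List.foldl_cons, List.reverse_cons, List.find?_append]
    rw [ih]
    cases hf : l.reverse.find? (fun e => p == e.2.2) with
    | some e' => simp
    | none =>
      by_cases h : p == e.2.2 <;> simp [h, ffiStepA]

-- forward last-match fold = reverse first-match flagged fold
theorem ffiAB (p : Int) (l : List (Int × Int × Int)) :
    (l.reverse.foldl (ffiStepB p) (((-1 : Int), (-1 : Int)), false)).1 =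
      l.foldl (ffiStepA p) ((-1 : Int), (-1 : Int)) := by
  rw [ffiStepB_char, ffiStepA_char]
  cases l.reverse.find? (fun e => p == e.2.2) <;> rfl

theorem ffiFoldl_flatMap {α β γ : Type} (g : α → List β) (f : γ → β → γ)
    (l : List α) (s : γ) :
    (l.flatMap g).foldl f s = l.foldl (fun s x => (g x).foldl f s) s := by
  induction l generalizing s with
  | nil => rfl
  | cons x l ih => simp [List.flatMap_cons, List.foldl_append, ih]

-- A equals the componentwise flat fold
theorem ffiA_flat (nd : List (List Int)) (p1 p2 : Int) :
    find_front_index nd p1 p2 =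
      (let a := (ffiFlat nd).foldl (ffiStepA p1) ((-1 : Int), (-1 : Int))
       let b := (ffiFlat nd).foldl (ffiStepA p2) ((-1 : Int), (-1 : Int))
       (a.1, a.2, b.1, b.2)) := by
  unfold find_front_index ffiFlat
  rw [ffiFoldl_flatMap, ffiFoldl_flatMap]
  have hinner : ∀ (ifn : Int × List Int) (s : (Int × Int) × (Int × Int)),
      (PySem.List.enumerate ifn.2 0).foldl
        (fun (s : (Int × Int) × (Int × Int)) jv =>
          ((if p1 == jv.2 then (ifn.1, jv.1) else s.1),
           (if p2 == jv.2 then (ifn.1, jv.1) else s.2))) s =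
      (((PySem.List.enumerate ifn.2 0).map (fun jv => (ifn.1, jv.1, jv.2))).foldl (ffiStepA p1) s.1,
       ((PySem.List.enumerate ifn.2 0).map (fun jv => (ifn.1, jv.1, jv.2))).foldl (ffiStepA p2) s.2) := by
    intro ifn s
    rw [List.foldl_map, List.foldl_map]
    exact ffiProdSplit (fun (a : Int × Int) (jv : Int × Int) => if p1 == jv.2 then (ifn.1, jv.1) else a)
      (fun (a : Int × Int) (jv : Int × Int) => if p2 == jv.2 then (ifn.1, jv.1) else a) _ s.1 s.2
  simp only [hinner]
  have houter := ffiProdSplit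
    (fun (a : Int × Int) (ifn : Int × List Int) =>
      ((PySem.List.enumerate ifn.2 0).map (fun jv => (ifn.1, jv.1, jv.2))).foldl (ffiStepA p1) a)
    (fun (a : Int × Int) (ifn : Int × List Int) =>
      ((PySem.List.enumerate ifn.2 0).map (fun jv => (ifn.1, jv.1, jv.2))).foldl (ffiStepA p2) a)
    (PySem.List.enumerate nd 0) ((-1 : Int), (-1 : Int)) ((-1 : Int), (-1 : Int))
  rw [houter]

-- break elimination: the inner recursion equals two independent flagged folds
theorem ffiInner_nobreak (p1 p2 i : Int) (l : List (Int × Int))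
    (st : ((Int × Int) × Bool) × ((Int × Int) × Bool)) :
    ffiAltInner p1 p2 i l st =
      ((l.map (fun jv => (i, jv.1, jv.2))).foldl (ffiStepB p1) st.1,
       (l.map (fun jv => (i, jv.1, jv.2))).foldl (ffiStepB p2) st.2) := by
  induction l generalizing st with
  | nil => simp [ffiAltInner]
  | cons jv l ih =>
    simp only [ffiAltInner, List.map_cons, List.foldl_cons]
    set s1 := if !st.1.2 && p1 == jv.2 then ((i, jv.1), true) else st.1 with hs1
    set s2 := if !st.2.2 && p2 == jv.2 then ((i, jv.1), true) else st.2 with hs2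
    have e1 : ffiStepB p1 st.1 (i, jv.1, jv.2) = s1 := by simp [ffiStepB, hs1]
    have e2 : ffiStepB p2 st.2 (i, jv.1, jv.2) = s2 := by simp [ffiStepB, hs2]
    rw [e1, e2]
    by_cases hb : (s1.2 && s2.2) = true
    · have h1 : s1.2 = true := (Bool.and_eq_true_iff.mp hb).1
      have h2 : s2.2 = true := (Bool.and_eq_true_iff.mp hb).2
      rw [if_pos hb, ffiFold_flag_mono p1 _ s1 h1, ffiFold_flag_mono p2 _ s2 h2]
    · rw [if_neg hb, ih (s1, s2)]

-- once a flag is true, the outer fold is the identity on that side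
theorem ffiOuterFold_flagged (p : Int) (L : List (Int × List Int)) (s : (Int × Int) × Bool)
    (h : s.2 = true) :
    L.foldl (fun s ifn =>
      (((PySem.List.enumerate ifn.2 0).reverse).map (fun jv => (ifn.1, jv.1, jv.2))).foldl (ffiStepB p) s) s = s := by
  induction L with
  | nil => rfl
  | cons x xs ih =>
    simp only [List.foldl_cons]
    rw [ffiFold_flag_mono p _ s h]
    exact ih

-- break elimination for the outer recursion
theorem ffiOuter_nobreak (p1 p2 : Int) (L : List (Int × List Int))
    (st : ((Int × Int) × Bool) × ((Int × Int) × Bool)) :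
    ffiAltOuter p1 p2 L st =
      (L.foldl (fun s ifn =>
        (((PySem.List.enumerate ifn.2 0).reverse).map (fun jv => (ifn.1, jv.1, jv.2))).foldl (ffiStepB p1) s) st.1,
       L.foldl (fun s ifn =>
        (((PySem.List.enumerate ifn.2 0).reverse).map (fun jv => (ifn.1, jv.1, jv.2))).foldl (ffiStepB p2) s) st.2) := by
  induction L generalizing st with
  | nil => simp [ffiAltOuter]
  | cons ifn L ih =>
    simp only [ffiAltOuter, List.foldl_cons]
    rw [ffiInner_nobreak]
    set t1 := (((PySem.List.enumerate ifn.2 0).reverse).map (fun jv => (ifn.1, jv.1, jv.2))).foldl (ffiStepB p1) st.1 with ht1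
    set t2 := (((PySem.List.enumerate ifn.2 0).reverse).map (fun jv => (ifn.1, jv.1, jv.2))).foldl (ffiStepB p2) st.2 with ht2
    by_cases hb : (t1.2 && t2.2) = true
    · have h1 : t1.2 = true := (Bool.and_eq_true_iff.mp hb).1
      have h2 : t2.2 = true := (Bool.and_eq_true_iff.mp hb).2
      rw [if_pos hb, ffiOuterFold_flagged p1 L t1 h1, ffiOuterFold_flagged p2 L t2 h2]
    · rw [if_neg hb, ih (t1, t2)]

-- B equals the componentwise flagged fold over the reversed flat list
theorem ffiB_flat (nd : List (List Int)) (p1 p2 : Int) :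
    find_front_index_alt nd p1 p2 =
      (let a := ((ffiFlat nd).reverse.foldl (ffiStepB p1) (((-1 : Int), (-1 : Int)), false)).1
       let b := ((ffiFlat nd).reverse.foldl (ffiStepB p2) (((-1 : Int), (-1 : Int)), false)).1
       (a.1, a.2, b.1, b.2)) := by
  unfold find_front_index_alt
  rw [ffiOuter_nobreak]
  have hflat : (ffiFlat nd).reverse =
      ((PySem.List.enumerate nd 0).reverse).flatMap
        (fun ifn => ((PySem.List.enumerate ifn.2 0).reverse).map (fun jv => (ifn.1, jv.1, jv.2))) := by
    unfold ffiFlat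
    rw [List.reverse_flatMap]
    congr 1
    funext ifn
    exact (List.map_reverse ..).symm
  rw [hflat, ffiFoldl_flatMap, ffiFoldl_flatMap]

-- ===== VERDICT (by name: the statement is the Claim_ definition above) =====
theorem find_front_index_spec : Claim_equal_find_front_index := by
  intro nd p1 p2 _
  unfold Spec_find_front_index
  rw [ffiA_flat, ffiB_flat]
  rw [ffiAB p1 (ffiFlat nd), ffiAB p2 (ffiFlat nd)]
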